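-- pv_equiv track=rewrite | github.com/irfanznz/CS4775-final-proj | profile_hmm.py | get_alignment_columns_with_match_states
-- ===== SOURCE A (Python) =====
-- def get_alignment_columns(multiple_alignment):
--     """
--     Given a multiple alignment, returns a list of columns, where each column is a list of characters, one for each sequence in the alignment
--
--     Args:
--         - multiple_alignment: a list of strings representing the sequences in the multiple alignment
--
--     Returns:
--         - columns: a list of columns, where each column is a string of characters, one for each sequence in the alignment
--     """
--     columns = []
--     for i in range(len(multiple_alignment[0])):
--         column = ""
--         for sequence in multiple_alignment:
--             column += sequence[i]
--         columns.append(column)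
--     return columns
--
-- def get_alignment_columns_with_match_states(multiple_alignment):
--     """
--     Same as get_alignment_columns, but replaces dashes in non-match alignment columns with pound signs. This is to distinguish gaps due to deletion (in match states) and gaps due to insertion (in non-match states).
--
--     Args:
--         - multiple_alignment: a list of strings representing the sequences in the multiple alignment
--
--     Returns:
--         - columns: a list of columns, where each column is a string of characters, one for each sequence in the alignment. Dashes in non-match columns are replaced with pound signs.
--
--     Example:
--         >>> get_alignment_columns_with_match_states(['ABCE', 'AB-D', 'A--E', 'AC-D'])
--         ['AAAA', 'BB-C', 'C###', 'EDED']
--     """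
--     match_states, match_pattern = get_match_states(multiple_alignment)
--     alignment_columns = get_alignment_columns(multiple_alignment)
--
--     new_alignment_columns = []
--     for col, match in zip(alignment_columns, match_pattern):
--         if match:
--             new_alignment_columns.append(col)
--         else:
--             new_alignment_columns.append(col.replace('-', '#'))
--
--     return new_alignment_columns
--
-- def get_match_states(multiple_alignment):
--     """
--     Given a multiple alignment, returns the number of match states in the profile HMM and a string with the same length as the multiple alignment, with a * for match states and a space for other states
--
--     Args:
--         - multiple_alignment: a list of strings representing the sequences in   the multiple alignment
--
--     Returns:
--         - match_states: the number of match states in the profile HMM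
--         - match_pattern: a list of booleans, where True indicates a match state and False indicates a non-match state
--     """
--     num_sequences = len(multiple_alignment)
--     match_states = 0
--     match_pattern = []
--     for col in range(len(multiple_alignment[0])):
--         count_gaps = 0
--         for seqeuence in multiple_alignment:
--             if seqeuence[col] == "-":
--                 count_gaps += 1
--         if count_gaps < num_sequences // 2:
--             match_states += 1
--             match_pattern.append(True)
--         else:
--             match_pattern.append(False)
--     return (match_states, match_pattern)
-- ===== SOURCE B (Python) =====
-- def get_alignment_columns_with_match_states(multiple_alignment):
--     """One fused pass: per column, build the string and count gaps together,
--     then decide match (gaps < num_sequences // 2) and replace '-' with '#'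
--     in non-match columns."""
--     threshold = len(multiple_alignment) // 2
--     columns = []
--     for i in range(len(multiple_alignment[0])):
--         column = ""
--         count_gaps = 0
--         for sequence in multiple_alignment:
--             ch = sequence[i]
--             column += ch
--             if ch == '-':
--                 count_gaps += 1
--         if count_gaps < threshold:
--             columns.append(column)
--         else:
--             columns.append(column.replace('-', '#'))
--     return columns
-- ===== Notes on version B (the rewrite author's own statement) =====
-- stated objective: simpler
-- what changed: Replaced A's three separate column scans (get_match_states gap counting, get_alignment_columns construction, and a zip/combine loop) with one fused loop that builds each column string and counts its gaps together, deciding match/replace immediately.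
import Mathlib
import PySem

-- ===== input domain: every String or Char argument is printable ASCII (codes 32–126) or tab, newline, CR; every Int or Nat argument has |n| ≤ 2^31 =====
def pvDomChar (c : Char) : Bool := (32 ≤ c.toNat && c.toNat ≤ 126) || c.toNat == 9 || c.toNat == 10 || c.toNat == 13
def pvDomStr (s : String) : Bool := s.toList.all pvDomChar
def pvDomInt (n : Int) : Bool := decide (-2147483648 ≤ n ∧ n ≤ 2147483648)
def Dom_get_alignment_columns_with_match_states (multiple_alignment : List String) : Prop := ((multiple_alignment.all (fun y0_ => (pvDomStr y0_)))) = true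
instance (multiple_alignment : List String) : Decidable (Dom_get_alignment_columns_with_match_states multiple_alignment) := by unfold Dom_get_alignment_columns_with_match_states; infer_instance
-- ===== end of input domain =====

-- B fuses A's three passes (gap counting, column construction, combine) into one
-- loop per column; objective: simpler (one function, one pass; no speed claim).

-- ===== PORT A =====
-- helper get_alignment_columns: builds each column by concatenating sequence[i].
-- (Python's sequence[i] / multiple_alignment[0] raise IndexError where pyGet? is
-- none; the .getD defaults are never reached under Pre_, which excludes exactly
-- those inputs.)
def pvGetAlignmentColumns (multiple_alignment : List String) : List String :=
  (PySem.List.pyRange 0 (PySem.Str.len ((PySem.List.pyGet? multiple_alignment 0).getD "")) 1).foldl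
    (fun columns i =>
      columns ++ [multiple_alignment.foldl
        (fun column sequence => column.push ((PySem.Str.pyGet? sequence i).getD ' ')) ""]) []

-- helper get_match_states: counts gaps per column, match iff count_gaps < n // 2.
def pvGetMatchStates (multiple_alignment : List String) : Int × List Bool :=
  let num_sequences : Int := PySem.List.len multiple_alignment
  (PySem.List.pyRange 0 (PySem.Str.len ((PySem.List.pyGet? multiple_alignment 0).getD "")) 1).foldl
    (fun st col =>
      let count_gaps : Int := multiple_alignment.foldl
        (fun c sequence => if (PySem.Str.pyGet? sequence col).getD ' ' = '-' then c + 1 else c) 0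
      if count_gaps < PySem.Int.floordiv num_sequences 2 then (st.1 + 1, st.2 ++ [true])
      else (st.1, st.2 ++ [false]))
    ((0 : Int), ([] : List Bool))

def get_alignment_columns_with_match_states (multiple_alignment : List String) : List String :=
  let ms := pvGetMatchStates multiple_alignment
  let alignment_columns := pvGetAlignmentColumns multiple_alignment
  (alignment_columns.zip ms.2).foldl
    (fun acc p => if p.2 then acc ++ [p.1] else acc ++ [PySem.Str.replace p.1 "-" "#"]) []

-- ===== PORT B =====
-- one fused loop: build the column string and its gap count together, then decide.
def get_alignment_columns_with_match_states_alt (multiple_alignment : List String) : List String :=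
  let threshold : Int := PySem.Int.floordiv (PySem.List.len multiple_alignment) 2
  (PySem.List.pyRange 0 (PySem.Str.len ((PySem.List.pyGet? multiple_alignment 0).getD "")) 1).foldl
    (fun columns i =>
      let p := multiple_alignment.foldl
        (fun (st : String × Int) sequence =>
          let ch := (PySem.Str.pyGet? sequence i).getD ' '
          (st.1.push ch, if ch = '-' then st.2 + 1 else st.2))
        ("", (0 : Int))
      if p.2 < threshold then columns ++ [p.1]
      else columns ++ [PySem.Str.replace p.1 "-" "#"]) []

-- ===== PRECONDITION & SPEC =====
-- Pre_ excludes exactly the inputs where Python A raises IndexError: the empty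
-- alignment (multiple_alignment[0]) and ragged alignments where some sequence is
-- shorter than the first one (sequence[i]).
def Pre_get_alignment_columns_with_match_states (multiple_alignment : List String) : Prop :=
  multiple_alignment ≠ [] ∧
  ∀ s ∈ multiple_alignment,
    PySem.Str.len ((PySem.List.pyGet? multiple_alignment 0).getD "") ≤ PySem.Str.len s
instance (multiple_alignment : List String) : Decidable (Pre_get_alignment_columns_with_match_states multiple_alignment) := by unfold Pre_get_alignment_columns_with_match_states; infer_instance

def pvWitness_get_alignment_columns_with_match_states : List String := ["ABCE", "AB-D", "A--E", "AC-D"]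

def Spec_get_alignment_columns_with_match_states (multiple_alignment : List String) (out : List String) : Prop := out = get_alignment_columns_with_match_states_alt multiple_alignment
instance (multiple_alignment : List String) (out : List String) : Decidable (Spec_get_alignment_columns_with_match_states multiple_alignment out) := by unfold Spec_get_alignment_columns_with_match_states; infer_instance

-- ===== CLAIM (what is proved, stated in full; the proofs are below) =====
def Claim_equal_get_alignment_columns_with_match_states : Prop := ∀ (multiple_alignment : List String), Dom_get_alignment_columns_with_match_states multiple_alignment → Pre_get_alignment_columns_with_match_states multiple_alignment → Spec_get_alignment_columns_with_match_states multiple_alignment (get_alignment_columns_with_match_states multiple_alignment)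

-- ===== LEMMAS AND PROOFS =====

-- proof-only abbreviations for the per-column computations shared by both ports
def pvR (multiple_alignment : List String) : List Int :=
  PySem.List.pyRange 0 (PySem.Str.len ((PySem.List.pyGet? multiple_alignment 0).getD "")) 1

def pvColF (multiple_alignment : List String) (i : Int) : String :=
  multiple_alignment.foldl (fun column sequence => column.push ((PySem.Str.pyGet? sequence i).getD ' ')) ""

def pvGapF (multiple_alignment : List String) (i : Int) : Int :=
  multiple_alignment.foldl
    (fun cnt sequence => if (PySem.Str.pyGet? sequence i).getD ' ' = '-' then cnt + 1 else cnt) 0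

def pvThr (multiple_alignment : List String) : Int :=
  PySem.Int.floordiv (PySem.List.len multiple_alignment) 2

-- B's fused inner loop is the pair of A's two inner loops (over the same sequences).
theorem pvPairFold (i : Int) (l : List String) (c : String) (g : Int) :
    l.foldl
      (fun (st : String × Int) sequence =>
        let ch := (PySem.Str.pyGet? sequence i).getD ' '
        (st.1.push ch, if ch = '-' then st.2 + 1 else st.2)) (c, g)
    = (l.foldl (fun column sequence => column.push ((PySem.Str.pyGet? sequence i).getD ' ')) c,
       l.foldl (fun cnt sequence => if (PySem.Str.pyGet? sequence i).getD ' ' = '-' then cnt + 1 else cnt) g) := by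
  induction l generalizing c g with
  | nil => rfl
  | cons s t ih => simp only [List.foldl_cons]; exact ih _ _

-- the match_pattern component of A's get_match_states fold, with the counter generalized
theorem pvSndFold (cond : Int → Prop) [DecidablePred cond] (l : List Int) (ms : Int) (pat : List Bool) :
    (l.foldl
      (fun (st : Int × List Bool) i =>
        if cond i then (st.1 + 1, st.2 ++ [true]) else (st.1, st.2 ++ [false])) (ms, pat)).2
    = pat ++ l.map (fun i => decide (cond i)) := by
  induction l generalizing ms pat with
  | nil => simp
  | cons x t ih =>
    by_cases h : cond x <;> simp [h, ih]

theorem get_alignment_columns_with_match_states_eq (multiple_alignment : List String) :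
    get_alignment_columns_with_match_states multiple_alignment
    = get_alignment_columns_with_match_states_alt multiple_alignment := by
  have hA : get_alignment_columns_with_match_states multiple_alignment
      = (pvR multiple_alignment).foldl (fun acc i =>
          if decide (pvGapF multiple_alignment i < pvThr multiple_alignment) = true
          then acc ++ [pvColF multiple_alignment i]
          else acc ++ [PySem.Str.replace (pvColF multiple_alignment i) "-" "#"]) [] := by
    simp only [get_alignment_columns_with_match_states, pvGetAlignmentColumns, pvGetMatchStates,
      PySem.List.foldl_append_singleton_eq_map, List.nil_append, pvSndFold,
      List.zip_map', List.foldl_map, pvR, pvColF, pvGapF, pvThr]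
    rfl
  have hB : get_alignment_columns_with_match_states_alt multiple_alignment
      = (pvR multiple_alignment).foldl (fun acc i =>
          if pvGapF multiple_alignment i < pvThr multiple_alignment
          then acc ++ [pvColF multiple_alignment i]
          else acc ++ [PySem.Str.replace (pvColF multiple_alignment i) "-" "#"]) [] := by
    simp only [get_alignment_columns_with_match_states_alt, pvPairFold,
      pvR, pvColF, pvGapF, pvThr]
  rw [hA, hB]
  apply PySem.List.foldl_congr_mem
  intro acc i _
  by_cases h : pvGapF multiple_alignment i < pvThr multiple_alignment <;> simp [h]

-- ===== VERDICT (by name: the statement is the Claim_ definition above) =====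
theorem get_alignment_columns_with_match_states_spec : Claim_equal_get_alignment_columns_with_match_states := by
  intro ma _ _
  unfold Spec_get_alignment_columns_with_match_states
  exact get_alignment_columns_with_match_states_eq ma
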